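-- pv_equiv track=rewrite | github.com/backordinary/QDP-FSL | source/0/rotoadapt_file_pauli_general_f5009a.py | base_4_map
-- ===== SOURCE A (Python) =====
-- def base_4_map(name):
--     """
--         Used to convert a pauli string (essentially base 4) into a base 10 number for lookup in the expec value table
--     """
--     entry = 0
--     for i in range(0,len(name)):
--         if name[len(name) - i - 1] == 'I':
--             entry = entry + 0
--         if name[len(name) - i - 1] == 'X':
--             entry = entry + 4**i
--         if name[len(name) - i - 1] == 'Y':
--             entry = entry + 2*4**i
--         if name[len(name) - i - 1] == 'Z':
--             entry = entry + 3*4**i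
--     return entry
-- ===== SOURCE B (Python) =====
-- def base_4_map(name):
--     mapping = {'I': 0, 'X': 1, 'Y': 2, 'Z': 3}
--     entry = 0
--     for ch in name:
--         entry = entry * 4 + mapping.get(ch, 0)
--     return entry
-- ===== Notes on version B (the rewrite author's own statement) =====
-- stated objective: faster
-- what changed: Replaces the reverse-indexed loop summing digit*4**i terms with a single left-to-right Horner accumulation entry = entry*4 + digit via a dict lookup, eliminating all exponentiations and string indexing.
import Mathlib
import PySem

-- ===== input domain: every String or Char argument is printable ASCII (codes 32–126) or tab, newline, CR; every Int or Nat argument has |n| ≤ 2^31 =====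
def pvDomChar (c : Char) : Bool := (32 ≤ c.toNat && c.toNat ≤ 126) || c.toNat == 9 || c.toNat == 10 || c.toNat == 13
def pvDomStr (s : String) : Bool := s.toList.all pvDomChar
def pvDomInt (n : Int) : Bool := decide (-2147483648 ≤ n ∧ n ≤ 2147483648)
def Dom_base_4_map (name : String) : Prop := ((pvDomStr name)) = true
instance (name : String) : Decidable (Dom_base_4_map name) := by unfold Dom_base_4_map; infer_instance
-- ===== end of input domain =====

-- B replaces the reverse-indexed sum of digit*4**i terms by a left-to-right Horner
-- accumulation with a digit dictionary (objective: faster by a constant factor).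

-- ===== PORT A =====
def base_4_map (name : String) : Int :=
  (PySem.List.pyRange 0 (PySem.Str.len name) 1).foldl
    (fun entry i =>
      let c := PySem.Str.pyGet? name (PySem.Str.len name - i - 1)
      let entry := if c = some 'I' then entry + 0 else entry
      let entry := if c = some 'X' then entry + 4 ^ i.toNat else entry
      let entry := if c = some 'Y' then entry + 2 * 4 ^ i.toNat else entry
      if c = some 'Z' then entry + 3 * 4 ^ i.toNat else entry)
    0

-- ===== PORT B =====
def pvMapping : PySem.Dict Char Int :=
  PySem.Dict.ofList [('I', 0), ('X', 1), ('Y', 2), ('Z', 3)]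

def base_4_map_alt (name : String) : Int :=
  name.toList.foldl (fun entry ch => entry * 4 + PySem.Dict.getD pvMapping ch 0) 0

-- ===== PRECONDITION & SPEC =====
def Spec_base_4_map (name : String) (out : Int) : Prop := out = base_4_map_alt name
instance (name : String) (out : Int) : Decidable (Spec_base_4_map name out) := by unfold Spec_base_4_map; infer_instance

-- ===== CLAIM (what is proved, stated in full; the proofs are below) =====
def Claim_equal_base_4_map : Prop := ∀ (name : String), Dom_base_4_map name → Spec_base_4_map name (base_4_map name)

-- ===== LEMMAS AND PROOFS =====

-- digit value of an optional character, as A's four ifs compute it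
def pvDOpt (o : Option Char) : Int :=
  if o = some 'I' then 0 else if o = some 'X' then 1
  else if o = some 'Y' then 2 else if o = some 'Z' then 3 else 0

-- the base-4 value of a character list, most significant character first
def pvVal : List Char → Int
  | [] => 0
  | c :: l => pvDOpt (some c) * 4 ^ l.length + pvVal l

lemma pvBody_eq (o : Option Char) (entry : Int) (k : Nat) :
    (let e1 := if o = some 'I' then entry + 0 else entry
     let e2 := if o = some 'X' then e1 + 4 ^ k else e1
     let e3 := if o = some 'Y' then e2 + 2 * 4 ^ k else e2
     if o = some 'Z' then e3 + 3 * 4 ^ k else e3)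
    = entry + pvDOpt o * 4 ^ k := by
  simp only [pvDOpt]
  split_ifs <;> simp_all

lemma pvMapping_getD (c : Char) :
    PySem.Dict.getD pvMapping c 0 = pvDOpt (some c) := by
  have hmk : pvMapping = PySem.Dict.mk [('I', 0), ('X', 1), ('Y', 2), ('Z', 3)] := by decide
  by_cases h1 : c = 'I'
  · subst h1; decide
  by_cases h2 : c = 'X'
  · subst h2; decide
  by_cases h3 : c = 'Y'
  · subst h3; decide
  by_cases h4 : c = 'Z'
  · subst h4; decide
  rw [hmk]
  simp [PySem.Dict.getD, PySem.Dict.get?, pvDOpt,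
    h1, h2, h3, h4, Ne.symm h1, Ne.symm h2, Ne.symm h3, Ne.symm h4]

lemma pvA_list (l : List Char) :
    (PySem.List.pyRange 0 (l.length : Int) 1).foldl
      (fun entry i => entry + pvDOpt (PySem.List.pyGet? l ((l.length : Int) - i - 1)) * 4 ^ i.toNat)
      0 = pvVal l := by
  induction l with
  | nil => simp [PySem.List.pyRange_one_eq_nil, pvVal]
  | cons c l ih =>
    have hlen : ((c :: l).length : Int) = (l.length : Int) + 1 := by
      simp only [List.length_cons]; push_cast; ring
    rw [hlen, PySem.List.pyRange_one_succ_right (by positivity), List.foldl_append]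
    have hcongr :
        (PySem.List.pyRange 0 (l.length : Int) 1).foldl
          (fun entry i => entry + pvDOpt (PySem.List.pyGet? (c :: l) ((l.length : Int) + 1 - i - 1)) * 4 ^ i.toNat) 0
        = (PySem.List.pyRange 0 (l.length : Int) 1).foldl
          (fun entry i => entry + pvDOpt (PySem.List.pyGet? l ((l.length : Int) - i - 1)) * 4 ^ i.toNat) 0 := by
      apply PySem.List.foldl_congr_mem
      intro acc i hi
      rw [PySem.List.mem_pyRange_one] at hi
      have h0 : (0:Int) ≤ (l.length : Int) - i - 1 := by omega
      have h1 : (0:Int) ≤ (l.length : Int) + 1 - i - 1 := by omega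
      rw [PySem.List.pyGet?_of_nonneg _ h1, PySem.List.pyGet?_of_nonneg _ h0]
      have h2 : ((l.length : Int) + 1 - i - 1).toNat = ((l.length : Int) - i - 1).toNat + 1 := by omega
      rw [h2]
      simp
    rw [hcongr, ih]
    simp only [List.foldl_cons, List.foldl_nil]
    have hidx : (l.length : Int) + 1 - (l.length : Int) - 1 = 0 := by ring
    rw [hidx, PySem.List.pyGet?_zero_cons]
    have htn : ((l.length : Int)).toNat = l.length := by omega
    rw [htn]
    simp only [pvVal]
    ring

lemma pvHorner_acc (l : List Char) (a : Int) :
    l.foldl (fun entry ch => entry * 4 + PySem.Dict.getD pvMapping ch 0) a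
    = a * 4 ^ l.length + l.foldl (fun entry ch => entry * 4 + PySem.Dict.getD pvMapping ch 0) 0 := by
  induction l generalizing a with
  | nil => simp
  | cons c l ih =>
    simp only [List.foldl_cons, List.length_cons]
    rw [ih (a * 4 + PySem.Dict.getD pvMapping c 0), ih (0 * 4 + PySem.Dict.getD pvMapping c 0)]
    ring

lemma pvB_list (l : List Char) :
    l.foldl (fun entry ch => entry * 4 + PySem.Dict.getD pvMapping ch 0) 0 = pvVal l := by
  induction l with
  | nil => rfl
  | cons c l ih =>
    simp only [List.foldl_cons]
    rw [pvHorner_acc, ih]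
    simp only [pvVal, pvMapping_getD]
    ring

-- ===== VERDICT (by name: the statement is the Claim_ definition above) =====
theorem base_4_map_spec : Claim_equal_base_4_map := by
  intro name _
  unfold Spec_base_4_map base_4_map base_4_map_alt
  simp only [PySem.Str.len_eq, PySem.Str.pyGet?_eq, PySem.Chars.pyGet?_eq_listPyGet?]
  rw [pvB_list]
  have := pvA_list name.toList
  rw [← this]
  apply PySem.List.foldl_congr_mem
  intro acc i _
  exact pvBody_eq _ acc i.toNat
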